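-- pv_equiv track=rewrite | github.com/liuqiaochi/nonebot_plugin_laofeiTools | nonebot_plugin_laofei_tools/pet_data.py | get_pet_level
-- ===== SOURCE A (Python) =====
-- PET_EXP_PER_LEVEL = 50
--
-- def get_pet_level(exp: int) -> int:
--     """根据累计经验计算宠物等级（Lv1 ~ Lv100）
--
--     每级所需经验 = level × PET_EXP_PER_LEVEL（50）
--     """
--     level = 1
--     remaining = exp
--     while level < 100:
--         needed = level * PET_EXP_PER_LEVEL
--         if remaining < needed:
--             break
--         remaining -= needed
--         level += 1
--     return level
-- ===== SOURCE B (Python) =====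
-- def get_pet_level(exp: int) -> int:
--     # Binary search for the largest level L in [1, 100] whose cumulative
--     # experience requirement 25*L*(L-1) does not exceed exp.
--     lo, hi = 1, 100
--     while lo < hi:
--         mid = (lo + hi + 1) // 2
--         if 25 * mid * (mid - 1) <= exp:
--             lo = mid
--         else:
--             hi = mid - 1
--     return lo
-- ===== Notes on version B (the rewrite author's own statement) =====
-- stated objective: alternative
-- what changed: Replaced the level-by-level subtraction loop (up to 99 iterations) with a binary search over the level range [1,100] for the largest level whose cumulative experience requirement does not exceed exp (at most 7 iterations).
import Mathlib
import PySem

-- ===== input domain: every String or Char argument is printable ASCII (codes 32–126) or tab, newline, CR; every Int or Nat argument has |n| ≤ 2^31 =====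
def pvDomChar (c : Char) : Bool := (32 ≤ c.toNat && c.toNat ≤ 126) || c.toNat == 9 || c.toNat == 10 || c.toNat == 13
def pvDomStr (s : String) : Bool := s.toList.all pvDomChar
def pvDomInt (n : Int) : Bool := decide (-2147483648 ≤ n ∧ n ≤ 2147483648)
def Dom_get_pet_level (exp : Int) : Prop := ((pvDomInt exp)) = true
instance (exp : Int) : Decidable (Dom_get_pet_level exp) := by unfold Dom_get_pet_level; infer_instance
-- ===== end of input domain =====

-- B replaces A's level-by-level subtraction loop (up to 99 iterations) with a binary
-- search over [1,100] for the largest level L with 25*L*(L-1) ≤ exp (at most 7 iterations).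

-- ===== PORT A =====
-- `while level < 100: …` ported as fuel recursion; fuel 99 covers every iteration
-- (level starts at 1 and increases by 1 each pass, the guard stops it at 100).
def petLoopA (level remaining : Int) (fuel : Nat) : Int :=
  match fuel with
  | 0 => level
  | f + 1 =>
    if level < 100 then
      if remaining < level * 50 then level
      else petLoopA (level + 1) (remaining - level * 50) f
    else level

def get_pet_level (exp : Int) : Int := petLoopA 1 exp 99

-- ===== PORT B =====
-- `while lo < hi: …` ported as fuel recursion; the interval length hi - lo strictly
-- decreases each pass, so fuel 100 ≥ (100 - 1) covers every iteration.
def bsLoop (lo hi exp : Int) (fuel : Nat) : Int :=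
  match fuel with
  | 0 => lo
  | f + 1 =>
    if lo < hi then
      let mid := PySem.Int.floordiv (lo + hi + 1) 2
      if 25 * mid * (mid - 1) ≤ exp then bsLoop mid hi exp f
      else bsLoop lo (mid - 1) exp f
    else lo

def get_pet_level_alt (exp : Int) : Int := bsLoop 1 100 exp 100

-- ===== PRECONDITION & SPEC =====
def Spec_get_pet_level (exp : Int) (out : Int) : Prop := out = get_pet_level_alt exp
instance (exp : Int) (out : Int) : Decidable (Spec_get_pet_level exp out) := by unfold Spec_get_pet_level; infer_instance

-- ===== CLAIM (what is proved, stated in full; the proofs are below) =====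
def Claim_equal_get_pet_level : Prop := ∀ (exp : Int), Dom_get_pet_level exp → Spec_get_pet_level exp (get_pet_level exp)

-- ===== LEMMAS AND PROOFS =====

-- A's loop returns any m that satisfies the "level" characterization relative to (level, remaining).
theorem petLoopA_eq (fuel : Nat) : ∀ (l r m : Int), 1 ≤ l → l + (fuel : Int) = 100 →
    l ≤ m → m ≤ 100 →
    (m = l ∨ 25 * (m * (m - 1) - l * (l - 1)) ≤ r) →
    (m = 100 ∨ r < 25 * ((m + 1) * m - l * (l - 1))) →
    petLoopA l r fuel = m := by
  induction fuel with
  | zero =>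
    intro l r m _ hfl hlm hm100 _ _
    simp only [Nat.cast_zero, add_zero] at hfl
    simp only [petLoopA]
    omega
  | succ f ih =>
    intro l r m hl hfl hlm hm100 hlow hup
    have hl100 : l < 100 := by push_cast at hfl; omega
    simp only [petLoopA, if_pos hl100]
    by_cases hbr : r < l * 50
    · -- loop breaks: m must be l
      rw [if_pos hbr]
      rcases hlow with h | h
      · omega
      · by_contra hne
        have hm : l + 1 ≤ m := by omega
        nlinarith [mul_nonneg (by omega : (0:Int) ≤ m - l - 1) (by omega : (0:Int) ≤ m + l)]
    · rw [if_neg hbr]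
      have hr : l * 50 ≤ r := by omega
      have hml : l + 1 ≤ m := by
        by_contra hne
        have hmeq : m = l := by omega
        rcases hup with h | h
        · omega
        · rw [hmeq] at h; nlinarith
      apply ih (l + 1) (r - l * 50) m (by omega) (by push_cast at hfl ⊢; omega) hml hm100
      · right
        rcases hlow with h | h
        · omega
        · nlinarith
      · rcases hup with h | h
        · left; exact h
        · right; nlinarith

-- B's binary search lands on a value satisfying the same characterization (relative to level 1).
theorem bsLoop_spec (fuel : Nat) : ∀ (lo hi exp : Int), 1 ≤ lo → lo ≤ hi → hi ≤ 100 →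
    hi - lo ≤ (fuel : Int) →
    (lo = 1 ∨ 25 * lo * (lo - 1) ≤ exp) →
    (hi = 100 ∨ exp < 25 * (hi + 1) * hi) →
    lo ≤ bsLoop lo hi exp fuel ∧ bsLoop lo hi exp fuel ≤ hi ∧
      (bsLoop lo hi exp fuel = 1 ∨ 25 * bsLoop lo hi exp fuel * (bsLoop lo hi exp fuel - 1) ≤ exp) ∧
      (bsLoop lo hi exp fuel = 100 ∨ exp < 25 * (bsLoop lo hi exp fuel + 1) * bsLoop lo hi exp fuel) := by
  induction fuel with
  | zero =>
    intro lo hi exp hlo hlh hhi hfuel hlow hup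
    have : lo = hi := by push_cast at hfuel; omega
    simp only [bsLoop]
    subst this
    exact ⟨le_refl _, le_refl _, hlow, hup⟩
  | succ f ih =>
    intro lo hi exp hlo hlh hhi hfuel hlow hup
    simp only [bsLoop]
    by_cases hlt : lo < hi
    · rw [if_pos hlt]
      have hmid : PySem.Int.floordiv (lo + hi + 1) 2 = (lo + hi + 1) / 2 :=
        PySem.Int.floordiv_eq_ediv_of_pos (by norm_num)
      set mid := PySem.Int.floordiv (lo + hi + 1) 2 with hmiddef
      have hmlo : lo + 1 ≤ mid := by rw [hmid]; omega
      have hmhi : mid ≤ hi := by rw [hmid]; omega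
      by_cases hc : 25 * mid * (mid - 1) ≤ exp
      · rw [if_pos hc]
        have h := ih mid hi exp (by omega) hmhi hhi (by push_cast at hfuel ⊢; omega)
          (Or.inr hc) hup
        exact ⟨by omega, h.2.1, h.2.2.1, h.2.2.2⟩
      · rw [if_neg hc]
        have h := ih lo (mid - 1) exp hlo (by omega) (by omega) (by push_cast at hfuel ⊢; omega)
          hlow (Or.inr (by nlinarith [lt_of_not_ge hc]))
        exact ⟨h.1, by omega, h.2.2.1, h.2.2.2⟩
    · rw [if_neg hlt]
      have : lo = hi := by omega
      subst this
      exact ⟨le_refl _, le_refl _, hlow, hup⟩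

-- ===== VERDICT (by name: the statement is the Claim_ definition above) =====
theorem get_pet_level_spec : Claim_equal_get_pet_level := by
  intro exp _
  unfold Spec_get_pet_level get_pet_level get_pet_level_alt
  obtain ⟨h1, h2, hlow, hup⟩ := bsLoop_spec 100 1 100 exp (by norm_num) (by norm_num)
    (by norm_num) (by norm_num) (Or.inl rfl) (Or.inl rfl)
  set m := bsLoop 1 100 exp 100 with hm
  apply petLoopA_eq 99 1 exp m (by norm_num) (by norm_num) h1 h2
  · rcases hlow with h | h
    · left; exact h
    · right; nlinarith
  · rcases hup with h | h
    · left; exact h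
    · right; nlinarith
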